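-- pv_equiv track=rewrite | github.com/destifo/Competitive-Programming | B. Frog Jumps/FrogJumps.py | findMinD
-- ===== SOURCE A (Python) =====
-- def findMinD(s: str) -> int:
--     d = 1
--     last_r = -1
--     for i in range(len(s)):
--         if s[i] == 'R':
--             d = max(d, i-last_r)
--             last_r = i
--
--     d = max(d, len(s)-last_r)
--
--     return d
-- ===== SOURCE B (Python) =====
-- def findMinD(s: str) -> int:
--     return max(map(len, s.split('R'))) + 1
-- ===== Notes on version B (the rewrite author's own statement) =====
-- stated objective: faster
-- what changed: Instead of scanning indices with a running last-R/max-gap accumulator, B splits the string on 'R' and returns 1 + the length of the longest R-free segment; both are O(n) but B's work happens in C-level str.split/map(len)/max.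
import Mathlib
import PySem

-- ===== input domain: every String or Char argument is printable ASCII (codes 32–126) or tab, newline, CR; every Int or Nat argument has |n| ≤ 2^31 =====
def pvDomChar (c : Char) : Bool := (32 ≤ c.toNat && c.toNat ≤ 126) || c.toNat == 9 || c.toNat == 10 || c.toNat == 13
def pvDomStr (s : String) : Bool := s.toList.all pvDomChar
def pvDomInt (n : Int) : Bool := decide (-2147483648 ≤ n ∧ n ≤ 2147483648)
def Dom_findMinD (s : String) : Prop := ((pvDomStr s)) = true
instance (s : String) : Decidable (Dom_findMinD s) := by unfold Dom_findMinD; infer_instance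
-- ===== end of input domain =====

-- B replaces A's index scan (running last-R / running max gap) by splitting the string on 'R'
-- and returning 1 + the length of the longest R-free segment (objective: faster by a constant factor, measured).

-- ===== PORT A =====
-- streaming pass: running max gap d and index of the last 'R'
def findMinD (s : String) : Int :=
  let cs := s.toList
  let r := (PySem.List.pyRange 0 (cs.length : Int) 1).foldl
    (fun (st : Int × Int) i =>
      if PySem.List.pyGet? cs i = some 'R' then (max st.1 (i - st.2), i) else st)
    (1, -1)
  max r.1 ((cs.length : Int) - r.2)

-- ===== PORT B =====
-- return max(map(len, s.split('R'))) + 1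
-- s.split('R') (single-char, non-empty separator) is exactly List.splitOn 'R' on the code points;
-- max(...) over the (always nonempty) list of lengths is PySem.List.max? with the identity key.
def findMinD_alt (s : String) : Int :=
  (PySem.List.max? ((s.toList.splitOn 'R').map (fun seg => (seg.length : Int)))
      (fun y => y)).getD 0 + 1

-- ===== PRECONDITION & SPEC =====
def Spec_findMinD (s : String) (out : Int) : Prop := out = findMinD_alt s
instance (s : String) (out : Int) : Decidable (Spec_findMinD s out) := by unfold Spec_findMinD; infer_instance

-- ===== CLAIM (what is proved, stated in full; the proofs are below) =====
def Claim_equal_findMinD : Prop := ∀ (s : String), Dom_findMinD s → Spec_findMinD s (findMinD s)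

-- ===== LEMMAS AND PROOFS =====

-- structural form of A's loop
def loopA : List Char → Int → Int × Int → Int × Int
  | [], _, st => st
  | c :: t, k, st => loopA t (k + 1) (if c = 'R' then (max st.1 (k - st.2), k) else st)

-- absolute positions of 'R' starting at index k
def rpos : List Char → Int → List Int
  | [], _ => []
  | c :: t, k => if c = 'R' then k :: rpos t (k + 1) else rpos t (k + 1)

-- consecutive differences against a previous element
def gaps : Int → List Int → List Int
  | _, [] => []
  | p, x :: t => (x - p) :: gaps x t

theorem foldA_eq_loopA (t cs : List Char) (k : Nat) (st : Int × Int) (h : cs.drop k = t) :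
    (PySem.List.pyRange (k : Int) (cs.length : Int) 1).foldl
      (fun (st : Int × Int) i =>
        if PySem.List.pyGet? cs i = some 'R' then (max st.1 (i - st.2), i) else st) st
    = loopA t (k : Int) st := by
  induction t generalizing k st with
  | nil =>
    have hk : cs.length ≤ k := by
      by_contra hlt
      have := List.drop_eq_nil_iff.mp h
      omega
    rw [PySem.List.pyRange_one_eq_nil (by exact_mod_cast hk)]
    simp [loopA]
  | cons c t foldA_ih =>
    have hk : k < cs.length := by
      by_contra hge
      rw [List.drop_eq_nil_of_le (by omega)] at h
      exact List.cons_ne_nil _ _ h.symm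
    have hget : cs[k]? = some c := by
      have : (cs.drop k)[0]? = some c := by rw [h]; rfl
      rwa [List.getElem?_drop, Nat.add_zero] at this
    rw [PySem.List.pyRange_one_cons (by exact_mod_cast hk)]
    simp only [List.foldl_cons, PySem.List.pyGet?_natCast, hget]
    have hdrop : cs.drop (k + 1) = t := by
      rw [← List.drop_drop, h]; simp
    by_cases hc : c = 'R'
    · have := foldA_ih (k + 1) (max st.1 ((k : Int) - st.2), (k : Int)) hdrop
      rw [loopA]
      push_cast at this
      simpa [hc] using this
    · have := foldA_ih (k + 1) st hdrop
      rw [loopA]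
      push_cast at this
      simpa [hc] using this

theorem loopA_max_eq (cs : List Char) (k d lr : Int) :
    (fun r => max r.1 ((k + (cs.length : Int)) - r.2)) (loopA cs k (d, lr))
    = (gaps lr (rpos cs k ++ [k + (cs.length : Int)])).foldl max d := by
  induction cs generalizing k d lr with
  | nil => simp [loopA, rpos, gaps]
  | cons c t ih =>
    by_cases hc : c = 'R'
    · simp only [loopA, rpos, hc, if_pos, gaps, List.cons_append, List.foldl_cons, List.length_cons]
      have := ih (k + 1) (max d (k - lr)) k
      push_cast
      rw [show k + ((t.length : Int) + 1) = k + 1 + (t.length : Int) by ring]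
      simpa using this
    · simp only [loopA, rpos, hc, if_false, List.length_cons]
      have := ih (k + 1) d lr
      push_cast
      rw [show k + ((t.length : Int) + 1) = k + 1 + (t.length : Int) by ring]
      simpa using this

-- the gap list of the R positions IS the (+1)-shifted list of segment lengths of splitOnP
theorem gaps_eq_segments (cs : List Char) (k j : Int) :
    gaps (k - 1 - j) (rpos cs k ++ [k + (cs.length : Int)])
    = ((List.splitOnP (fun c => c == 'R') cs).map
        (fun seg => (seg.length : Int) + 1)).modifyHead (· + j) := by
  induction cs generalizing k j with
  | nil => simp [rpos, gaps, List.splitOnP_nil]; ring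
  | cons c t ih =>
    rw [List.splitOnP_cons]
    rcases hsp : List.splitOnP (fun c => c == 'R') t with _ | ⟨hd, rest⟩
    · exact absurd hsp (List.splitOnP_ne_nil _ t)
    have hlen : k + ((t.length : Int) + 1) = k + 1 + (t.length : Int) := by ring
    by_cases hc : c = 'R'
    · have h0 := ih (k + 1) 0
      rw [show k + 1 - 1 - 0 = k by ring, hsp] at h0
      simp only [List.map_cons, List.modifyHead_cons, add_zero] at h0
      simp only [rpos, hc, if_pos, gaps, List.cons_append, List.length_cons,
        beq_self_eq_true, List.map_cons, List.modifyHead_cons]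
      rw [show ((t.length + 1 : Nat) : Int) = (t.length : Int) + 1 by push_cast; ring, hlen, h0]
      congr 1
      simp
      omega
    · have hIH := ih (k + 1) (j + 1)
      rw [show k + 1 - 1 - (j + 1) = k - 1 - j by ring, hsp] at hIH
      simp only [List.map_cons, List.modifyHead_cons] at hIH
      have hcb : (c == 'R') = false := by simp [hc]
      simp only [rpos, hc, if_false, List.length_cons, hcb, List.modifyHead_cons]
      rw [show ((t.length + 1 : Nat) : Int) = (t.length : Int) + 1 by push_cast; ring, hlen, hIH]
      congr 1
      simp only [List.length_cons]
      push_cast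
      ring

theorem foldl_max_map_add_one (a : Int) (l : List (List Char)) :
    (l.map (fun seg => (seg.length : Int) + 1)).foldl max (a + 1)
    = (l.map (fun seg => (seg.length : Int))).foldl max a + 1 := by
  induction l generalizing a with
  | nil => rfl
  | cons x t ih =>
    simp only [List.map_cons, List.foldl_cons,
      show max (a + 1) ((x.length : Int) + 1) = max a (x.length : Int) + 1 from by omega]
    exact ih (max a (x.length : Int))

-- ===== VERDICT (by name: the statement is the Claim_ definition above) =====
theorem findMinD_spec : Claim_equal_findMinD := by
  intro s _
  unfold Spec_findMinD findMinD findMinD_alt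
  simp only []
  rw [show ((0 : Int)) = ((0 : Nat) : Int) by norm_num,
      foldA_eq_loopA s.toList s.toList 0 (1, -1) (by simp)]
  have hA := loopA_max_eq s.toList ((0 : Nat) : Int) 1 (-1)
  simp only [Int.natCast_zero, zero_add] at hA ⊢
  rw [hA]
  have hg := gaps_eq_segments s.toList 0 0
  rw [show (0 : Int) - 1 - 0 = -1 by ring, zero_add] at hg
  rw [hg, List.splitOn]
  rcases hsp : List.splitOnP (fun c => c == 'R') s.toList with _ | ⟨h0, rest⟩
  · exact absurd hsp (List.splitOnP_ne_nil _ s.toList)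
  simp only [List.map_cons, List.modifyHead_cons, add_zero, PySem.List.max?_id_cons,
    Option.getD_some, List.foldl_cons]
  rw [show max 1 ((h0.length : Int) + 1) = (h0.length : Int) + 1 by
        have : (0 : Int) ≤ (h0.length : Int) := Int.natCast_nonneg _; omega]
  exact foldl_max_map_add_one _ _
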